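-- pv_equiv track=rewrite | github.com/Baikasas/Receipt-exporter | preparing_data.py | add_categories
-- ===== SOURCE A (Python) =====
-- def add_categories(categories, defined_subcategories):
--     for sub in defined_subcategories:
--
--         for category, subs in categories.items():
--             if sub[1] in subs:
--                 sub.insert(1, category)
--                 break
--         else:
--             sub.insert(1, "N/A")
--
--     return defined_subcategories
-- ===== SOURCE B (Python) =====
-- def add_categories(categories, defined_subcategories):
--     # Build a reverse index: element -> first category containing it.
--     index = {}
--     for category, subs in categories.items():
--         for element in subs:
--             index.setdefault(element, category)
--     for sub in defined_subcategories:
--         sub.insert(1, index.get(sub[1], "N/A"))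
--     return defined_subcategories
-- ===== Notes on version B (the rewrite author's own statement) =====
-- stated objective: faster
-- what changed: Replaces the per-subcategory linear scan over all categories' element lists with a reverse index (element -> first category) built once, giving O(1) dict lookups per subcategory.
-- outside the precondition, e.g. on add_categories({}, [[], ['']]): A returns [['N/A'], ['', 'N/A']], B raises IndexError
import Mathlib
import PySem

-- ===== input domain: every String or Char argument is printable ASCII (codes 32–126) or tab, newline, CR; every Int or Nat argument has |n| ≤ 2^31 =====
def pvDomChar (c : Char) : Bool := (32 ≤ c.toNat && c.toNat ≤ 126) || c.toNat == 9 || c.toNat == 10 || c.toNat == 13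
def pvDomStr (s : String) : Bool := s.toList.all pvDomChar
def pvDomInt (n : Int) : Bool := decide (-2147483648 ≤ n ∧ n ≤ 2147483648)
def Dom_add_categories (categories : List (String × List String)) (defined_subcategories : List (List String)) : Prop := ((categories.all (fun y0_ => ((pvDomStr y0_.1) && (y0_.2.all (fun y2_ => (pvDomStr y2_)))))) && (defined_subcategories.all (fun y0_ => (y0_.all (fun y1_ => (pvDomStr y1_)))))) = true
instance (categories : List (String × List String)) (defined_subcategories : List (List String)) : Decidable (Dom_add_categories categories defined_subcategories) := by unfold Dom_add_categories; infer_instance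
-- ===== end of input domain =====

-- B replaces A's per-subcategory scan of every category's element list with a reverse
-- index (element -> first category) built once; equivalence is about the RETURN value
-- (the Python versions mutate the inner lists of defined_subcategories in place,
-- identically in A and B).

-- ===== PORT A =====
-- inner `for category, subs in categories.items(): if sub[1] in subs: … break / else:` loop;
-- `sub[1]` is evaluated once per category pair, so an empty `categories` never reads it.
-- result: none = IndexError from sub[1]; some (some c) = break with category c; some none = else branch
def scanA : List (String × List String) → List String → Option (Option String)
  | [], _ => some none
  | (category, subs) :: rest, sub =>
      match PySem.List.pyGet? sub 1 with
      | none => none   -- Python raises IndexError here; excluded by Pre_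
      | some x => if x ∈ subs then some (some category) else scanA rest sub

def add_categories (categories : List (String × List String)) (defined_subcategories : List (List String)) : List (List String) :=
  defined_subcategories.map (fun sub =>
    match scanA categories sub with
    | none => sub   -- IndexError; excluded by Pre_
    | some (some category) => PySem.List.insert sub 1 category
    | some none => PySem.List.insert sub 1 "N/A")

-- ===== PORT B =====
-- `for category, subs in categories.items(): for element in subs: index.setdefault(element, category)`
def buildIndexB (categories : List (String × List String)) : PySem.Dict String String :=
  categories.foldl
    (fun d p => p.2.foldl (fun d e => d.setdefault e p.1) d)
    PySem.Dict.empty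

def add_categories_alt (categories : List (String × List String)) (defined_subcategories : List (List String)) : List (List String) :=
  let index := buildIndexB categories
  defined_subcategories.map (fun sub =>
    match PySem.List.pyGet? sub 1 with
    | none => sub   -- Python raises IndexError here (sub[1]); excluded by Pre_
    | some x => PySem.List.insert sub 1 (index.getD x "N/A"))

-- ===== PRECONDITION & SPEC =====
-- Pre_ excludes the inputs where some subcategory row has fewer than 2 entries: there A
-- raises IndexError (sub[1]) whenever categories is non-empty, and when categories is empty
-- A happens never to read sub[1] and pads every row with "N/A"; B always reads sub[1] and raises.
def Pre_add_categories (_categories : List (String × List String)) (defined_subcategories : List (List String)) : Prop :=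
  ∀ sub ∈ defined_subcategories, 2 ≤ sub.length
instance (categories : List (String × List String)) (defined_subcategories : List (List String)) : Decidable (Pre_add_categories categories defined_subcategories) := by unfold Pre_add_categories; infer_instance

def pvWitness_add_categories : (List (String × List String)) × List (List String) :=
  ([("Food", ["milk", "bread"]), ("Tools", ["hammer"])],
   [["2.50", "milk"], ["1.00", "nail"], ["3.00", "hammer"]])

def Spec_add_categories (categories : List (String × List String)) (defined_subcategories : List (List String)) (out : List (List String)) : Prop := out = add_categories_alt categories defined_subcategories
instance (categories : List (String × List String)) (defined_subcategories : List (List String)) (out : List (List String)) : Decidable (Spec_add_categories categories defined_subcategories out) := by unfold Spec_add_categories; infer_instance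

-- ===== CLAIM (what is proved, stated in full; the proofs are below) =====
def Claim_equal_add_categories : Prop := ∀ (categories : List (String × List String)) (defined_subcategories : List (List String)), Dom_add_categories categories defined_subcategories → Pre_add_categories categories defined_subcategories → Spec_add_categories categories defined_subcategories (add_categories categories defined_subcategories)

-- ===== LEMMAS AND PROOFS =====
-- proof-side characterisation of A's inner scan once sub[1] is known to be x
def findCatA : List (String × List String) → String → Option String
  | [], _ => none
  | (category, subs) :: rest, x =>
      if x ∈ subs then some category else findCatA rest x

theorem get?_setdefault_loop (subs : List String) (c : String)
    (d : PySem.Dict String String) (x : String) :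
    (subs.foldl (fun d e => d.setdefault e c) d).get? x =
      match d.get? x with
      | some v => some v
      | none => if x ∈ subs then some c else none := by
  induction subs generalizing d with
  | nil => cases h : d.get? x <;> simp [h]
  | cons e rest ih =>
    rw [List.foldl_cons, ih]
    by_cases hc : d.contains e = true
    · rw [PySem.Dict.setdefault_of_contains _ _ hc]
      cases h : d.get? x with
      | some v => rfl
      | none =>
        by_cases hx : x = e
        · subst hx
          rw [PySem.Dict.contains_eq_isSome_get?, h] at hc
          simp at hc
        · simp [List.mem_cons, hx]
    · rw [PySem.Dict.setdefault_of_not_contains _ _ (by simpa using hc)]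
      by_cases hx : x = e
      · subst hx
        rw [PySem.Dict.get?_insert_self]
        have : d.get? x = none := by
          rw [PySem.Dict.contains_eq_isSome_get?] at hc
          cases h : d.get? x with
          | none => rfl
          | some v => rw [h] at hc; simp at hc
        rw [this]; simp
      · rw [PySem.Dict.get?_insert_of_ne _ _ hx]
        cases d.get? x with
        | some v => rfl
        | none => simp [List.mem_cons, hx]

theorem get?_buildIndex_loop (categories : List (String × List String))
    (d : PySem.Dict String String) (x : String) :
    (categories.foldl (fun d p => p.2.foldl (fun d e => d.setdefault e p.1) d) d).get? x =
      match d.get? x with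
      | some v => some v
      | none => findCatA categories x := by
  induction categories generalizing d with
  | nil => cases h : d.get? x <;> simp [h, findCatA]
  | cons p rest ih =>
    rw [List.foldl_cons, ih, get?_setdefault_loop]
    cases d.get? x with
    | some v => rfl
    | none =>
      obtain ⟨c, subs⟩ := p
      by_cases hx : x ∈ subs <;> simp [findCatA, hx]

theorem getD_buildIndex (categories : List (String × List String)) (x : String) :
    (buildIndexB categories).getD x "N/A" =
      (findCatA categories x).getD "N/A" := by
  rw [PySem.Dict.getD_eq_get?_getD, buildIndexB, get?_buildIndex_loop]
  simp [PySem.Dict.get?_empty]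

theorem scanA_eq_findCatA (categories : List (String × List String)) (sub : List String)
    (x : String) (h : PySem.List.pyGet? sub (1 : Int) = some x) :
    scanA categories sub = some (findCatA categories x) := by
  induction categories with
  | nil => rfl
  | cons p rest ih =>
    obtain ⟨c, subs⟩ := p
    rw [scanA, h, findCatA]
    by_cases hx : x ∈ subs <;> simp [hx, ih]

-- ===== VERDICT (by name: the statement is the Claim_ definition above) =====
theorem add_categories_spec : Claim_equal_add_categories := by
  intro categories defs _hdom hpre
  unfold Spec_add_categories add_categories add_categories_alt
  apply List.map_congr_left
  intro sub hmem
  obtain ⟨a, b, rest, rfl⟩ : ∃ a b rest, sub = a :: b :: rest := by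
    have h2 := hpre sub hmem
    match sub with
    | a :: b :: rest => exact ⟨a, b, rest, rfl⟩
  have hget : PySem.List.pyGet? (a :: b :: rest) (1 : Int) = some b := by
    simp [PySem.List.pyGet?, PySem.List.pyIdx?]
  rw [scanA_eq_findCatA categories _ _ hget, hget]
  simp only [getD_buildIndex]
  cases findCatA categories b <;> simp
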